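-- pv_equiv track=rewrite | github.com/seyam460/seyam460 | wishingcard.py | maximize_happiness
-- ===== SOURCE A (Python) =====
-- def maximize_happiness(n, k, a):
--     current_max = 0
--     remaining = k
--     happiness = 0
--
--     for i in range(n):
--         if a[i] > current_max and remaining > 0:
--             increase = min(a[i] - current_max, remaining)
--             current_max += increase
--             remaining -= increase
--
--         happiness += current_max
--
--     return happiness
-- ===== SOURCE B (Python) =====
-- def maximize_happiness(n, k, a):
--     # Pass 1: record positions where a strict new maximum appears.
--     records = []
--     for i in range(n):
--         if not records or a[i] > records[-1][1]:
--             records.append((i, a[i]))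
--     # Pass 2 (back to front): each record's clamped value holds for a whole
--     # segment, so add clamp * segment_length instead of per-element sums.
--     happiness = 0
--     end = n
--     for pos, val in reversed(records):
--         happiness += max(0, min(val, k)) * (end - pos)
--         end = pos
--     return happiness
-- ===== Notes on version B (the rewrite author's own statement) =====
-- stated objective: alternative
-- what changed: B replaces A's per-element budget-tracking accumulation by a two-stage record/segment computation: it first collects the positions where a new strict maximum appears, then sums clamp(value)*segment_length per record segment back-to-front.
import Mathlib
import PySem

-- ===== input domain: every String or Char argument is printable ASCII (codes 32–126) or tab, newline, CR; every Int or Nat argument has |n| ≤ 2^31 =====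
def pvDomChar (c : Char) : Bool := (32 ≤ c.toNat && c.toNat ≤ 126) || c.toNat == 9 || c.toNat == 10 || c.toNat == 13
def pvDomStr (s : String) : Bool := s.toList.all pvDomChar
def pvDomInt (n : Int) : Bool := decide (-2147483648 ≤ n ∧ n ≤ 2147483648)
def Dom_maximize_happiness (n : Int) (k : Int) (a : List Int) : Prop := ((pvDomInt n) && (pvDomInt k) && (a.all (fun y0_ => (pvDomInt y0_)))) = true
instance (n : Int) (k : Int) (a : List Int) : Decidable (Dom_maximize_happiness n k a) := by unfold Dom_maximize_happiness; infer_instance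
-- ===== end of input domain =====

-- B replaces A's per-element budget accumulation by a two-stage record/segment
-- computation: collect the strict-new-maximum records, then sum
-- clamp(value)*segment_length per record back-to-front (objective: alternative).

-- ===== PORT A =====
-- one loop step of A: state (current_max, remaining, happiness)
def mhStepA (s : Int × Int × Int) (x : Int) : Int × Int × Int :=
  let cm := s.1
  let rem := s.2.1
  let hap := s.2.2
  if x > cm ∧ rem > 0 then
    let inc := min (x - cm) rem
    (cm + inc, rem - inc, hap + (cm + inc))
  else
    (cm, rem, hap + cm)

def maximize_happiness (n : Int) (k : Int) (a : List Int) : Int :=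
  ((PySem.List.pyRange 0 n 1).foldl
    (fun s i => mhStepA s (PySem.List.pyGetD a i 0)) (0, k, 0)).2.2

-- ===== PORT B =====
-- pass 1 step: append (i, a[i]) when a[i] strictly exceeds the last record's value
def mhRec (a : List Int) (r : List (Int × Int)) (i : Int) : List (Int × Int) :=
  let x := PySem.List.pyGetD a i 0
  match r.getLast? with
  | none => r ++ [(i, x)]
  | some pv => if x > pv.2 then r ++ [(i, x)] else r

-- pass 2 step (records reversed): state (happiness, end of current segment)
def mhSeg (k : Int) (s : Int × Int) (pv : Int × Int) : Int × Int :=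
  (s.1 + max 0 (min pv.2 k) * (s.2 - pv.1), pv.1)

def maximize_happiness_alt (n : Int) (k : Int) (a : List Int) : Int :=
  let records := (PySem.List.pyRange 0 n 1).foldl (mhRec a) []
  (records.reverse.foldl (mhSeg k) (0, n)).1

-- ===== PRECONDITION & SPEC =====
-- Pre_ excludes exactly the inputs where Python A raises IndexError (n > len(a)); B raises there too.
def Pre_maximize_happiness (n : Int) (k : Int) (a : List Int) : Prop := n ≤ (a.length : Int)
instance (n : Int) (k : Int) (a : List Int) : Decidable (Pre_maximize_happiness n k a) := by unfold Pre_maximize_happiness; infer_instance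
def pvWitness_maximize_happiness : Int × Int × List Int := (2, 3, [5, 1])

def Spec_maximize_happiness (n : Int) (k : Int) (a : List Int) (out : Int) : Prop := out = maximize_happiness_alt n k a
instance (n : Int) (k : Int) (a : List Int) (out : Int) : Decidable (Spec_maximize_happiness n k a out) := by unfold Spec_maximize_happiness; infer_instance

-- ===== CLAIM (what is proved, stated in full; the proofs are below) =====
def Claim_equal_maximize_happiness : Prop := ∀ (n : Int) (k : Int) (a : List Int), Dom_maximize_happiness n k a → Pre_maximize_happiness n k a → Spec_maximize_happiness n k a (maximize_happiness n k a)

-- ===== LEMMAS AND PROOFS =====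

-- a fold over range(0, m) indexing xs is a fold over the first m elements
theorem mh_fold_take {β : Type} (f : β → Int → β) (xs : List Int) :
    ∀ (m : Nat), m ≤ xs.length → ∀ (init : β),
    (PySem.List.pyRange 0 (m : Int) 1).foldl (fun s i => f s (PySem.List.pyGetD xs i 0)) init
      = (xs.take m).foldl f init := by
  intro m
  induction m with
  | zero => intro _ init; simp [PySem.List.pyRange_zero_nat]
  | succ m ih =>
    intro hm init
    have hm' : m ≤ xs.length := Nat.le_of_succ_le hm
    have hlt : m < xs.length := hm
    have htake : xs.take (m + 1) = xs.take m ++ [xs[m]] := by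
      rw [List.take_succ]; simp [List.getElem?_eq_getElem hlt]
    rw [show ((m + 1 : Nat) : Int) = (m : Int) + 1 by push_cast; ring,
        PySem.List.pyRange_one_succ_right (by positivity),
        List.foldl_append, ih hm', htake, List.foldl_append]
    simp [PySem.List.pyGetD_natCast, List.getD, List.getElem?_eq_getElem hlt]

-- happiness accumulates additively and the segment end is independent of it
theorem mhSeg_shift (k : Int) : ∀ (l : List (Int × Int)) (h e : Int),
    l.foldl (mhSeg k) (h, e)
      = (h + (l.foldl (mhSeg k) (0, e)).1, (l.foldl (mhSeg k) (0, e)).2) := by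
  intro l
  induction l with
  | nil => intro h e; simp
  | cons pv t ih =>
    intro h e
    simp only [List.foldl_cons, mhSeg]
    rw [ih (h + max 0 (min pv.2 k) * (e - pv.1)) pv.1,
        ih (0 + max 0 (min pv.2 k) * (e - pv.1)) pv.1]
    simp only [Prod.mk.injEq]
    exact ⟨by ring, trivial⟩

-- the segment sum of B's second pass
def mhS (k : Int) (r : List (Int × Int)) (e : Int) : Int :=
  (r.reverse.foldl (mhSeg k) (0, e)).1

theorem mhS_nil (k e : Int) : mhS k [] e = 0 := rfl

theorem mhS_append (k : Int) (r : List (Int × Int)) (p v e : Int) :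
    mhS k (r ++ [(p, v)]) e = max 0 (min v k) * (e - p) + mhS k r p := by
  unfold mhS
  rw [List.reverse_append]
  simp only [List.reverse_singleton, List.singleton_append, List.foldl_cons, mhSeg]
  rw [mhSeg_shift k r.reverse (0 + max 0 (min v k) * (e - p)) p]
  ring_nf

-- main invariant: after the first m elements, A's happiness is the segment sum
-- of B's record list ending at m, A's remaining is k - current_max, and
-- current_max is the clamp of the last record's value
theorem mh_main (k : Int) (a : List Int) :
    ∀ (m : Nat), m ≤ a.length →
    ((a.take m).foldl mhStepA (0, k, 0)).2.2
        = mhS k ((PySem.List.pyRange 0 (m : Int) 1).foldl (mhRec a) []) m ∧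
    ((a.take m).foldl mhStepA (0, k, 0)).2.1 = k - ((a.take m).foldl mhStepA (0, k, 0)).1 ∧
    (((PySem.List.pyRange 0 (m : Int) 1).foldl (mhRec a) [] = []
        ∧ ((a.take m).foldl mhStepA (0, k, 0)).1 = 0) ∨
     (∃ r0 p b, (PySem.List.pyRange 0 (m : Int) 1).foldl (mhRec a) [] = r0 ++ [(p, b)]
        ∧ ((a.take m).foldl mhStepA (0, k, 0)).1 = max 0 (min b k))) := by
  intro m
  induction m with
  | zero =>
    intro _
    simp [PySem.List.pyRange_zero_nat, mhS_nil]
  | succ m ih =>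
    intro hm
    have hm' : m ≤ a.length := Nat.le_of_succ_le hm
    have hlt : m < a.length := hm
    obtain ⟨hhap, hrem, hcm⟩ := ih hm'
    have htake : a.take (m + 1) = a.take m ++ [a[m]] := by
      rw [List.take_succ]; simp [List.getElem?_eq_getElem hlt]
    have hrng : PySem.List.pyRange 0 ((m + 1 : Nat) : Int) 1
        = PySem.List.pyRange 0 (m : Int) 1 ++ [(m : Int)] := by
      rw [show ((m + 1 : Nat) : Int) = (m : Int) + 1 by push_cast; ring]
      exact PySem.List.pyRange_one_succ_right (by positivity)
    have hget : PySem.List.pyGetD a (m : Int) 0 = a[m] := by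
      simp [PySem.List.pyGetD_natCast, List.getD, List.getElem?_eq_getElem hlt]
    rw [htake, hrng, List.foldl_append, List.foldl_append]
    simp only [List.foldl_cons, List.foldl_nil]
    rcases hstE : (a.take m).foldl mhStepA (0, k, 0) with ⟨cm, rem, hap⟩
    rw [hstE] at hhap hrem hcm
    simp only at hhap hrem hcm
    set r := (PySem.List.pyRange 0 (m : Int) 1).foldl (mhRec a) [] with hr
    set x := a[m] with hx
    rcases hcm with ⟨hre, hcm0⟩ | ⟨r0, p, b, hrb, hcmb⟩
    · -- no records yet: cm = 0, hap = 0
      have hS0 : mhS k r (m : Int) = 0 := by rw [hre]; exact mhS_nil k _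
      have hrec : mhRec a r (m : Int) = [((m : Int), x)] := by
        rw [hre]; simp [mhRec, hget]
      rw [hrec]
      have hS1 : mhS k [((m : Int), x)] ((m + 1 : Nat) : Int)
          = max 0 (min x k) * (((m + 1 : Nat) : Int) - (m : Int)) + mhS k [] (m : Int) :=
        mhS_append k [] (m : Int) x _
      rw [hS1, mhS_nil]
      have hd : (((m + 1 : Nat) : Int) - (m : Int)) = 1 := by push_cast; ring
      rw [hd]
      simp only [mhStepA]
      refine ⟨?_, ?_, Or.inr ⟨[], (m : Int), x, by simp, ?_⟩⟩ <;>
        (split_ifs with h <;> simp only <;> omega)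
    · -- last record (p, b): cm = clamp b
      have hlast : r.getLast? = some (p, b) := by rw [hrb]; simp
      by_cases hxb : x > b
      · -- new record appended
        have hrec : mhRec a r (m : Int) = r ++ [((m : Int), x)] := by
          simp [mhRec, hget, hlast, hxb]
        rw [hrec]
        have hS1 : mhS k (r ++ [((m : Int), x)]) ((m + 1 : Nat) : Int)
            = max 0 (min x k) * (((m + 1 : Nat) : Int) - (m : Int)) + mhS k r (m : Int) :=
          mhS_append k r (m : Int) x _
        have hd : (((m + 1 : Nat) : Int) - (m : Int)) = 1 := by push_cast; ring
        rw [hS1, hd]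
        simp only [mhStepA]
        refine ⟨?_, ?_, Or.inr ⟨r, (m : Int), x, rfl, ?_⟩⟩ <;>
          (split_ifs with h <;> simp only <;> omega)
      · -- record list unchanged, segment of b grows by 1
        have hrec : mhRec a r (m : Int) = r := by
          simp [mhRec, hget, hlast, hxb]
        rw [hrec]
        have hSm : mhS k r (m : Int) = max 0 (min b k) * ((m : Int) - p) + mhS k r0 p := by
          rw [hrb]; exact mhS_append k r0 p b _
        have hSm1 : mhS k r ((m + 1 : Nat) : Int)
            = max 0 (min b k) * (((m + 1 : Nat) : Int) - p) + mhS k r0 p := by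
          rw [hrb]; exact mhS_append k r0 p b _
        have hgrow : mhS k r ((m + 1 : Nat) : Int) = mhS k r (m : Int) + max 0 (min b k) := by
          rw [hSm, hSm1]; push_cast; ring
        rw [hgrow]
        simp only [mhStepA]
        refine ⟨?_, ?_, Or.inr ⟨r0, p, b, hrb, ?_⟩⟩ <;>
          (split_ifs with h <;> simp only <;> omega)

-- ===== VERDICT (by name: the statement is the Claim_ definition above) =====
theorem maximize_happiness_spec : Claim_equal_maximize_happiness := by
  intro n k a _ hpre
  unfold Spec_maximize_happiness maximize_happiness maximize_happiness_alt
  by_cases hn : 0 ≤ n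
  · have hcast : n = ((n.toNat : Nat) : Int) := (Int.toNat_of_nonneg hn).symm
    have hle : n.toNat ≤ a.length := by
      unfold Pre_maximize_happiness at hpre; omega
    obtain ⟨hhap, -, -⟩ := mh_main k a n.toNat hle
    rw [hcast, mh_fold_take mhStepA a n.toNat hle]
    exact hhap
  · rw [PySem.List.pyRange_one_eq_nil (by omega)]
    rfl
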